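-- pv_equiv track=rewrite | github.com/lookinfuu/HomeWork9 | BankProgMakeWithTest/TestBank/bank.py | your_cash
-- ===== SOURCE A (Python) =====
-- def your_cash(payment, month):
--     if month == 0:
--         return payment
--     cash = 0
--     while month > 0:
--         cash += payment
--         month -= 1
--     return cash
-- ===== SOURCE B (Python) =====
-- def your_cash(payment, month):
--     if month == 0:
--         return payment
--     return payment * max(month, 0)
-- ===== Notes on version B (the rewrite author's own statement) =====
-- stated objective: faster
-- what changed: Replaces the O(month) accumulation loop with a direct multiplication payment*max(month,0), keeping the month==0 special case.
import Mathlib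
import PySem

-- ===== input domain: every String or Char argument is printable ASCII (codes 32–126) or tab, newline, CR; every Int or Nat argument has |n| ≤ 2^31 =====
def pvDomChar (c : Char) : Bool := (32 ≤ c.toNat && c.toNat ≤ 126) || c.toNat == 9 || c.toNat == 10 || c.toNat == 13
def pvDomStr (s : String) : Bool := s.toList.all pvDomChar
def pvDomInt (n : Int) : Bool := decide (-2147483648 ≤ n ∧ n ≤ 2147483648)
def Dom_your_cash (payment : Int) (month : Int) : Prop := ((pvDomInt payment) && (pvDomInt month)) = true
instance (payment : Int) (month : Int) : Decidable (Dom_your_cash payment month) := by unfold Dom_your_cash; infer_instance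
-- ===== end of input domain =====

-- B replaces A's O(month) accumulation loop with a closed-form multiplication (objective: faster).

-- ===== PORT A =====
-- the 'while month > 0' loop, carrying (cash, month)
def yourCashLoop (payment cash month : Int) : Int :=
  if month > 0 then yourCashLoop payment (cash + payment) (month - 1) else cash
termination_by month.toNat
decreasing_by omega

def your_cash (payment : Int) (month : Int) : Int :=
  if month == 0 then payment else yourCashLoop payment 0 month

-- ===== PORT B =====
def your_cash_alt (payment : Int) (month : Int) : Int :=
  if month == 0 then payment else payment * max month 0

-- ===== PRECONDITION & SPEC =====
def Spec_your_cash (payment : Int) (month : Int) (out : Int) : Prop := out = your_cash_alt payment month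
instance (payment : Int) (month : Int) (out : Int) : Decidable (Spec_your_cash payment month out) := by unfold Spec_your_cash; infer_instance

-- ===== CLAIM (what is proved, stated in full; the proofs are below) =====
def Claim_equal_your_cash : Prop := ∀ (payment : Int) (month : Int), Dom_your_cash payment month → Spec_your_cash payment month (your_cash payment month)

-- ===== LEMMAS AND PROOFS =====
theorem yourCashLoop_eq (payment cash month : Int) :
    yourCashLoop payment cash month = cash + payment * max month 0 := by
  by_cases h : month > 0
  · rw [yourCashLoop]
    simp only [h, if_pos]
    rw [yourCashLoop_eq payment (cash + payment) (month - 1)]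
    have : max (month - 1) 0 = month - 1 := by omega
    have h2 : max month 0 = month := by omega
    rw [this, h2]; ring
  · rw [yourCashLoop]
    simp only [h, if_neg, if_false]
    have : max month 0 = 0 := by omega
    rw [this]; ring
termination_by month.toNat
decreasing_by omega

-- ===== VERDICT (by name: the statement is the Claim_ definition above) =====
theorem your_cash_spec : Claim_equal_your_cash := by
  intro payment month _
  unfold Spec_your_cash your_cash your_cash_alt
  by_cases h : month == 0
  · simp [h]
  · simp only [h, if_false, Bool.false_eq_true]
    rw [yourCashLoop_eq]; ring
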